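-- pv_equiv track=rewrite | github.com/DanielHara/leetcode-solutions | solutions/2294.py | partitionArray
-- ===== SOURCE A (Python) =====
-- from typing import List
--
-- def partitionArray(nums: List[int], k: int) -> int:
--     nums.sort()
--
--     result = 0
--
--     i = 0
--     while i < len(nums):
--         j = i + 1
--         while j < len(nums) and nums[j] - nums[i] <= k:
--             j = j + 1
--
--         i = j
--         result = result + 1
--
--     return result
-- ===== SOURCE B (Python) =====
-- def partitionArray(nums, k):
--     # Selection-style recursion on the multiset: no sorting. Each group is
--     # [m, m+k] where m = min of what's left; peel it off and recurse.
--     # (A sorts nums in place; B does not mutate nums.)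
--     rem = list(nums)
--     count = 0
--     while rem:
--         m = min(rem)
--         rem.remove(m)
--         rem = [x for x in rem if x - m > k]
--         count += 1
--     return count
-- ===== Notes on version B (the rewrite author's own statement) =====
-- stated objective: alternative
-- what changed: Drops the sort entirely: a selection-style loop repeatedly takes the minimum of the remaining multiset, removes it and filters out everything within k of it, counting one group per round (O(n*groups) instead of sort-then-scan).
import Mathlib
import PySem

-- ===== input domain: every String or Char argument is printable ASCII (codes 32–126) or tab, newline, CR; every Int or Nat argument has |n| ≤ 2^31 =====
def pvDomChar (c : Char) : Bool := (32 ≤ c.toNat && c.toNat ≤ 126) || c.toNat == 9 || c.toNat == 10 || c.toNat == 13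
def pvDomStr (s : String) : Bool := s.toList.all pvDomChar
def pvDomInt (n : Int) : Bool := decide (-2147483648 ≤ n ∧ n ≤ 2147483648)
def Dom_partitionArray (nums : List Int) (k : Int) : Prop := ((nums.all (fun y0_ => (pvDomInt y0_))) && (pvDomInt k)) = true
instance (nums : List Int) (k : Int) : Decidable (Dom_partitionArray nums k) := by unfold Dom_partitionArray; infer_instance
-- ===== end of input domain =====

-- B replaces A's sort + nested-while scan by a sort-free selection loop
-- (repeatedly take the min of the remaining multiset, remove it and filter out
-- everything within k of it). Equivalence is about the RETURN value only:
-- A sorts nums in place in Python, B does not mutate nums.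
-- ===== PORT A =====
-- inner while: advance j while nums[j] - nums[i] <= k, i.e. drop the matching prefix
def pvSkipA (k a : Int) : List Int → List Int
  | [] => []
  | x :: xs => if x - a ≤ k then pvSkipA k a xs else x :: xs

theorem pvSkipA_len (k a : Int) : ∀ xs : List Int, (pvSkipA k a xs).length ≤ xs.length
  | [] => Nat.le_refl _
  | x :: xs => by
      simp only [pvSkipA]
      split
      · exact Nat.le_succ_of_le (pvSkipA_len k a xs)
      · exact Nat.le_refl _

-- outer while: i := j, result := result + 1
def pvLoopA (k : Int) : List Int → Int
  | [] => 0
  | a :: xs => pvLoopA k (pvSkipA k a xs) + 1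
termination_by l => l.length
decreasing_by exact Nat.lt_succ_of_le (pvSkipA_len k a xs)

def partitionArray (nums : List Int) (k : Int) : Int :=
  pvLoopA k (PySem.List.sorted nums (fun x => x) false)

-- ===== PORT B =====
-- while rem: m = min(rem); rem.remove(m); rem = [x for x in rem if x - m > k]; count += 1
def pvLoopB (k : Int) (rem : List Int) : Int :=
  match h1 : PySem.List.min? rem (fun x => x) with
  | none => 0
  | some m =>
    match h2 : PySem.List.remove? rem m with
    | none => 0   -- unreachable: min is a member
    | some rem' => pvLoopB k (rem'.filter (fun x => decide (x - m > k))) + 1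
termination_by rem.length
decreasing_by
  have hm : m ∈ rem := PySem.List.min?_mem h1
  have he : PySem.List.remove? rem m = some (rem.erase m) :=
    PySem.List.remove?_eq_some_erase rem m hm
  have : rem' = rem.erase m := by rw [h2] at he; exact (Option.some.inj he)
  calc (rem'.filter (fun x => decide (x - m > k))).length
      ≤ rem'.length := List.length_filter_le _ _
    _ = (rem.erase m).length := by rw [this]
    _ < rem.length := by
        rw [List.length_erase_of_mem hm]
        exact Nat.sub_lt (List.length_pos_of_mem hm) Nat.one_pos

def partitionArray_alt (nums : List Int) (k : Int) : Int := pvLoopB k nums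

-- ===== PRECONDITION & SPEC =====
def Spec_partitionArray (nums : List Int) (k : Int) (out : Int) : Prop := out = partitionArray_alt nums k
instance (nums : List Int) (k : Int) (out : Int) : Decidable (Spec_partitionArray nums k out) := by unfold Spec_partitionArray; infer_instance

-- ===== CLAIM =====
def Claim_equal_partitionArray : Prop := ∀ (nums : List Int) (k : Int), Dom_partitionArray nums k → Spec_partitionArray nums k (partitionArray nums k)

-- ===== LEMMAS AND PROOFS =====

-- on a ≤-sorted list A's inner while (drop matching prefix) is a filter
theorem pvSkipA_of_pairwise (k a : Int) :
    ∀ l : List Int, l.Pairwise (· ≤ ·) →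
      pvSkipA k a l = l.filter (fun x => decide (x - a > k))
  | [], _ => rfl
  | x :: xs, h => by
      rcases List.pairwise_cons.mp h with ⟨hx, hxs⟩
      by_cases hc : x - a ≤ k
      · have : ¬ (x - a > k) := not_lt.mpr hc
        simp only [pvSkipA, if_pos hc, List.filter_cons, decide_eq_true_eq]
        rw [if_neg this]
        exact pvSkipA_of_pairwise k a xs hxs
      · have hgt : x - a > k := lt_of_not_ge hc
        simp only [pvSkipA, if_neg hc, List.filter_cons, decide_eq_true_eq, if_pos hgt]
        congr 1
        symm
        refine List.filter_eq_self.mpr ?_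
        intro y hy
        have : x ≤ y := hx y hy
        simp only [decide_eq_true_eq]
        omega

theorem pvAB (k : Int) (nums : List Int) :
    pvLoopA k (PySem.List.sorted nums (fun x => x) false) = pvLoopB k nums := by
  cases hs : PySem.List.sorted nums (fun x => x) false with
  | nil =>
      have hn : nums = [] := (PySem.List.sorted_eq_nil_iff _ _ _).mp hs
      subst hn
      rw [pvLoopB.eq_def]
      simp [pvLoopA, PySem.List.min?]
  | cons a rest =>
      have hperm : (a :: rest).Perm nums := hs ▸ PySem.List.sorted_perm nums _ _
      have hne : nums ≠ [] := by
        intro h; subst h; exact absurd hperm.length_eq (by simp)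
      have hamem : a ∈ nums := hperm.mem_iff.mp (List.mem_cons_self ..)
      have hale : ∀ y ∈ nums, a ≤ y := by
        intro y hy
        simpa using PySem.List.key_head_sorted_le (xs := nums) (key := fun x => x) hs y hy
      have hpw : (a :: rest).Pairwise (· ≤ ·) := by
        have := PySem.List.sorted_pairwise (xs := nums) (key := fun x => x)
        rw [hs] at this; exact this
      rcases List.pairwise_cons.mp hpw with ⟨_, hrestpw⟩
      -- B side: the min is a, remove? erases its first occurrence
      obtain ⟨m, hm⟩ : ∃ m, PySem.List.min? nums (fun x => x) = some m := by
        cases hmin : PySem.List.min? nums (fun x => x) with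
        | none => exact absurd ((PySem.List.min?_eq_none_iff _ _).mp hmin) hne
        | some m => exact ⟨m, rfl⟩
      have hma : m = a := by
        have h1 : m ∈ nums := PySem.List.min?_mem hm
        have h2 : ∀ y ∈ nums, m ≤ y := by
          intro y hy
          simpa using PySem.List.min?_isMin (key := fun x => x) hm y hy
        exact le_antisymm (h2 a hamem) (hale m h1)
      subst hma
      have hrm : PySem.List.remove? nums m = some (nums.erase m) :=
        PySem.List.remove?_eq_some_erase nums m hamem
      rw [pvLoopB.eq_def]
      split
      · rename_i h1; rw [hm] at h1; cases h1
      · rename_i m' h1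
        rw [hm] at h1
        cases h1
        split
        · rename_i h2; rw [hrm] at h2; cases h2
        · rename_i rem' h2
          rw [hrm] at h2
          cases h2
          -- A side
          rw [pvLoopA, pvSkipA_of_pairwise k m rest hrestpw]
          -- relate the two recursive arguments through sorted
          have herase : (nums.erase m).Perm rest := by
            have := hperm.symm.erase m
            simpa using this
          have hfilt : ((nums.erase m).filter (fun x => decide (x - m > k))).Perm
              (rest.filter (fun x => decide (x - m > k))) := herase.filter _
          have hsorted : PySem.List.sorted ((nums.erase m).filter (fun x => decide (x - m > k)))
              (fun x => x) false = rest.filter (fun x => decide (x - m > k)) :=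
            PySem.List.sorted_id_eq_of_perm_of_pairwise _ _ hfilt.symm
              (hrestpw.sublist List.filter_sublist)
          rw [← hsorted, pvAB k ((nums.erase m).filter (fun x => decide (x - m > k)))]
termination_by nums.length
decreasing_by
  calc ((nums.erase m).filter (fun x => decide (x - m > k))).length
      ≤ (nums.erase m).length := List.length_filter_le _ _
    _ < nums.length := by
        rw [List.length_erase_of_mem hamem]
        exact Nat.sub_lt (List.length_pos_of_mem hamem) Nat.one_pos

-- ===== VERDICT =====
theorem partitionArray_spec : Claim_equal_partitionArray := by
  intro nums k _
  unfold Spec_partitionArray partitionArray partitionArray_alt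
  exact pvAB k nums
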